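-- pv_equiv track=rewrite | github.com/konstantintogoi/leetcode | problems/3625_count_number_of_trapezoids_ii.py | count
-- ===== SOURCE A (Python) =====
-- def count(sides_counter: dict[int, dict[int, int]]) -> int:
--     cnt = 0
--
--     for sides in sides_counter.values():
--         remaining_sides_cnt = sum(sides.values())
--
--         for sides_cnt in sides.values():
--             remaining_sides_cnt -= sides_cnt
--             cnt += sides_cnt * remaining_sides_cnt
--
--     return cnt
-- ===== SOURCE B (Python) =====
-- def count(sides_counter: dict[int, dict[int, int]]) -> int:
--     groups = [list(sides.values()) for sides in sides_counter.values()]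
--     total_sq = sum(sum(vs) ** 2 for vs in groups)
--     total_q = sum(v * v for vs in groups for v in vs)
--     return (total_sq - total_q) // 2
-- ===== Notes on version B (the rewrite author's own statement) =====
-- stated objective: simpler
-- what changed: Replaces A's per-group running remaining-count pairwise accumulator with two staged whole-input aggregate passes (sum of squared group totals, and sum of squared bucket counts) combined once at the end by the identity sum of distinct-pair products = (sum S_g^2 - sum v^2)/2, using exact integer floor division.
import Mathlib
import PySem

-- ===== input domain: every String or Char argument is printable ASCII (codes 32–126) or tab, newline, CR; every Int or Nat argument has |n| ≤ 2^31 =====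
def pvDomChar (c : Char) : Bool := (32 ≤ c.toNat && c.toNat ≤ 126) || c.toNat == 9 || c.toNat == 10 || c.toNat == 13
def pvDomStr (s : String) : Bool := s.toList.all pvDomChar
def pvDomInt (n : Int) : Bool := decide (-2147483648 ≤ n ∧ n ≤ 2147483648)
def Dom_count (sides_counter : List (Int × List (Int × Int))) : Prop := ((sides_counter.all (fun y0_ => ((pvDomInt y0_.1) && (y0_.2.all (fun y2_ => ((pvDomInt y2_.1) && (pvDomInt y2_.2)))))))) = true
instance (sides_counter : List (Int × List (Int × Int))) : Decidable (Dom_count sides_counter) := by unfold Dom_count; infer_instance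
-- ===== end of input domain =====

-- B replaces A's per-group running remaining-count accumulator with staged whole-input
-- aggregate passes combined once by the closed form (ΣS_g² − Σv²)//2 (objective: simpler).

-- ===== PORT A =====
def count (sides_counter : List (Int × List (Int × Int))) : Int :=
  sides_counter.foldl (fun cnt g =>
    let vals := g.2.map (·.2)
    let remaining := vals.foldl (· + ·) 0
    (vals.foldl (fun st v => (st.1 - v, st.2 + v * (st.1 - v))) (remaining, cnt)).2) 0

-- ===== PORT B =====
-- recursive sum of a list (port of Python's sum over a generator)
def pvSum : List Int → Int
  | [] => 0
  | v :: t => v + pvSum t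

-- recursive sum of squares of a list
def pvSqSum : List Int → Int
  | [] => 0
  | v :: t => v * v + pvSqSum t

def count_alt (sides_counter : List (Int × List (Int × Int))) : Int :=
  let groups := sides_counter.map (fun sides => sides.2.map Prod.snd)
  let totalSq := pvSum (groups.map (fun vs => pvSum vs * pvSum vs))
  let totalQ := pvSum (groups.map pvSqSum)
  PySem.Int.floordiv (totalSq - totalQ) 2

-- ===== PRECONDITION & SPEC =====
def Spec_count (sides_counter : List (Int × List (Int × Int))) (out : Int) : Prop := out = count_alt sides_counter
instance (sides_counter : List (Int × List (Int × Int))) (out : Int) : Decidable (Spec_count sides_counter out) := by unfold Spec_count; infer_instance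

-- ===== CLAIM =====
def Claim_equal_count : Prop := ∀ (sides_counter : List (Int × List (Int × Int))), Dom_count sides_counter → Spec_count sides_counter (count sides_counter)

-- ===== LEMMAS AND PROOFS =====

-- A's inner pairwise loop as a structural recursion
def pvPF : List Int → Int → Int
  | [], _ => 0
  | v :: t, r => v * (r - v) + pvPF t (r - v)

theorem pvFoldlSum (vs : List Int) (a : Int) : vs.foldl (· + ·) a = a + pvSum vs := by
  induction vs generalizing a with
  | nil => simp [pvSum]
  | cons v t ih => simp [List.foldl, pvSum, ih]; ring

theorem pvInner (vs : List Int) (rem cnt : Int) :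
    (vs.foldl (fun st v => (st.1 - v, st.2 + v * (st.1 - v))) (rem, cnt)).2 = cnt + pvPF vs rem := by
  induction vs generalizing rem cnt with
  | nil => simp [pvPF]
  | cons v t ih => simp [List.foldl, pvPF, ih]; ring

theorem pvKey (vs : List Int) (r : Int) :
    2 * pvPF vs r = r * r - (r - pvSum vs) * (r - pvSum vs) - pvSqSum vs := by
  induction vs generalizing r with
  | nil => simp [pvPF, pvSum, pvSqSum]
  | cons v t ih =>
    simp only [pvPF, pvSum, pvSqSum, mul_add, ih (r - v)]
    ring

-- A's whole fold equals cnt plus the sum of per-group pairwise contributions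
theorem pvOuter (sc : List (Int × List (Int × Int))) (cnt : Int) :
    sc.foldl (fun cnt g =>
      let vals := g.2.map (·.2)
      let remaining := vals.foldl (· + ·) 0
      (vals.foldl (fun st v => (st.1 - v, st.2 + v * (st.1 - v))) (remaining, cnt)).2) cnt
    = cnt + pvSum (sc.map (fun g => pvPF (g.2.map Prod.snd) (pvSum (g.2.map Prod.snd)))) := by
  induction sc generalizing cnt with
  | nil => simp [pvSum]
  | cons g t ih =>
    simp only [List.foldl, List.map, pvSum]
    rw [pvInner, pvFoldlSum, ih]
    ring

theorem pvDouble (sc : List (Int × List (Int × Int))) :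
    2 * pvSum (sc.map (fun g => pvPF (g.2.map Prod.snd) (pvSum (g.2.map Prod.snd))))
    = pvSum ((sc.map (fun g => g.2.map Prod.snd)).map (fun vs => pvSum vs * pvSum vs))
      - pvSum ((sc.map (fun g => g.2.map Prod.snd)).map pvSqSum) := by
  induction sc with
  | nil => simp [pvSum]
  | cons g t ih =>
    simp only [List.map, pvSum, mul_add, ih]
    have hk := pvKey (g.2.map Prod.snd) (pvSum (g.2.map Prod.snd))
    simp only [sub_self, mul_zero] at hk
    omega

-- ===== VERDICT =====
theorem count_spec : Claim_equal_count := by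
  intro sc _
  unfold Spec_count count count_alt
  simp only []
  rw [pvOuter, zero_add]
  have h := pvDouble sc
  have h2 : pvSum ((sc.map (fun g => g.2.map Prod.snd)).map (fun vs => pvSum vs * pvSum vs))
      - pvSum ((sc.map (fun g => g.2.map Prod.snd)).map pvSqSum)
      = 2 * pvSum (sc.map (fun g => pvPF (g.2.map Prod.snd) (pvSum (g.2.map Prod.snd)))) := by omega
  rw [h2, PySem.Int.floordiv_eq_ediv_of_pos (by norm_num),
    Int.mul_ediv_cancel_left _ (by norm_num : (2:Int) ≠ 0)]
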